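-- pv_equiv track=rewrite | github.com/rishiraj95/LingualSense | solution_2.py | minToMax
-- ===== SOURCE A (Python) =====
-- def minToMax(N,A):
--     n= len(A)
--     if n == 1:
--         return 0
--     minA = min(A)
--     maxA = max(A)
--     count = 0
--     for i in A:
--         if minA < i:
--             count  += 1
--     return count
-- ===== SOURCE B (Python) =====
-- def minToMax(N, A):
--     s = sorted(A)
--     i = 0
--     while i < len(s) and s[i] == s[0]:
--         i += 1
--     return len(s) - i
-- ===== Notes on version B (the rewrite author's own statement) =====
-- stated objective: alternative
-- what changed: Instead of computing the minimum and tallying greater elements in a counting loop, B sorts the list and skips past the leading run of equal smallest elements; the answer is the length of the remaining suffix.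
import Mathlib
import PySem

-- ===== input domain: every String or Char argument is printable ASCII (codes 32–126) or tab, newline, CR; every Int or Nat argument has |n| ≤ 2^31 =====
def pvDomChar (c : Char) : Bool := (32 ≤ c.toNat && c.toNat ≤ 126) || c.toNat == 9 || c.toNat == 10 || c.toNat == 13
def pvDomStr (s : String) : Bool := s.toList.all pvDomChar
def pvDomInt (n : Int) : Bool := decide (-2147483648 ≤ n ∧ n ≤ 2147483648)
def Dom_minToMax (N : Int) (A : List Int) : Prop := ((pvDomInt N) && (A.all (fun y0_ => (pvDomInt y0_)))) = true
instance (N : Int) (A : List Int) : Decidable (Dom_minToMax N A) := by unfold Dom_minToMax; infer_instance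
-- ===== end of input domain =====

-- B sorts the list and skips past the leading run of smallest elements instead of A's
-- min-then-counting loop; objective: alternative (sort-then-scan decomposition).

-- ===== PORT A =====
def minToMax (N : Int) (A : List Int) : Int :=
  let n : Int := A.length
  if n = 1 then 0
  else
    match PySem.List.min? A (fun x => x), PySem.List.max? A (fun x => x) with
    | some minA, some _maxA =>
        A.foldl (fun count i => if minA < i then count + 1 else count) 0
    | _, _ => 0   -- unreachable under Pre_ (min/max of the empty list raise ValueError)

-- ===== PORT B =====
-- the while loop 'while i < len(s) and s[i] == s[0]: i += 1' as structural recursion over s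
-- with the fixed head value m = s[0]; returns the final i (the length of the leading run)
def pvRunLen (m : Int) : List Int → Nat
  | [] => 0
  | x :: t => if x = m then pvRunLen m t + 1 else 0

def minToMax_alt (N : Int) (A : List Int) : Int :=
  let s := PySem.List.sorted A (fun x => x) false
  match s with
  | [] => (s.length : Int) - 0          -- empty: the while loop never runs, i = 0
  | m :: _ => (s.length : Int) - (pvRunLen m s : Int)

-- ===== PRECONDITION & SPEC =====
-- Pre_ excludes only the empty list, on which A raises ValueError (min([])).
def Pre_minToMax (N : Int) (A : List Int) : Prop := A ≠ []
instance (N : Int) (A : List Int) : Decidable (Pre_minToMax N A) := by unfold Pre_minToMax; infer_instance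
def pvWitness_minToMax : Int × List Int := (3, [2, 1, 2, 5])

def Spec_minToMax (N : Int) (A : List Int) (out : Int) : Prop := out = minToMax_alt N A
instance (N : Int) (A : List Int) (out : Int) : Decidable (Spec_minToMax N A out) := by unfold Spec_minToMax; infer_instance

-- ===== CLAIM (what is proved, stated in full; the proofs are below) =====
def Claim_equal_minToMax : Prop := ∀ (N : Int) (A : List Int), Dom_minToMax N A → Pre_minToMax N A → Spec_minToMax N A (minToMax N A)

-- ===== LEMMAS AND PROOFS =====

-- A's loop over a list whose elements are all ≥ m counts length minus the multiplicity of m.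
theorem countGT_loop (L : List Int) (m c : Int) (h : ∀ x ∈ L, m ≤ x) :
    L.foldl (fun count i => if m < i then count + 1 else count) c
      = c + (L.length : Int) - (L.count m : Int) := by
  induction L generalizing c with
  | nil => simp
  | cons a t ih =>
    have ha : m ≤ a := h a (by simp)
    have ht : ∀ x ∈ t, m ≤ x := fun x hx => h x (by simp [hx])
    by_cases hlt : m < a
    · have hne : ¬ (a = m) := by omega
      simp only [List.foldl_cons, if_pos hlt, ih _ ht, List.count_cons]
      simp
      omega
    · have heq : a = m := by omega
      simp only [List.foldl_cons, ih _ ht, List.count_cons, heq]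
      simp
      omega

-- in a ≤-sorted list whose elements are all ≥ m, the leading run of m's has length count m
theorem runLen_eq_count (m : Int) (L : List Int) (hlb : ∀ x ∈ L, m ≤ x)
    (hp : L.Pairwise (· ≤ ·)) : (pvRunLen m L : Int) = L.count m := by
  induction L with
  | nil => simp [pvRunLen]
  | cons x t ih =>
    have hx : m ≤ x := hlb x (by simp)
    have hxt : ∀ y ∈ t, x ≤ y := fun y hy => (List.pairwise_cons.mp hp).1 y hy
    have hpt : t.Pairwise (· ≤ ·) := (List.pairwise_cons.mp hp).2
    by_cases hxm : x = m
    · subst hxm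
      have iht := ih (fun y hy => hxt y hy) hpt
      simp only [pvRunLen, if_pos rfl, List.count_cons_self]
      push_cast
      omega
    · have hm_not : m ∉ (x :: t) := by
        intro hmem
        rcases List.mem_cons.mp hmem with h | h
        · exact hxm h.symm
        · have hxle := hxt m h
          have : m < x := lt_of_le_of_ne hx (fun e => hxm e.symm)
          omega
      simp [pvRunLen, hxm, List.count_eq_zero.mpr hm_not]

-- ===== VERDICT (by name: the statement is the Claim_ definition above) =====
theorem minToMax_spec : Claim_equal_minToMax := by
  intro N A _ hpre
  unfold Spec_minToMax minToMax minToMax_alt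
  cases A with
  | nil => exact absurd rfl hpre
  | cons a t =>
    simp only [PySem.List.min?_id_cons, PySem.List.max?_id_cons]
    have hmin : PySem.List.min? (a :: t) (fun x => x) = some (t.foldl min a) :=
      PySem.List.min?_id_cons ..
    have hsne : PySem.List.sorted (a :: t) (fun x => x) false ≠ [] := by
      intro h
      exact List.cons_ne_nil a t
        ((PySem.List.sorted_eq_nil_iff (a :: t) (fun x => x) false).mp h)
    obtain ⟨m, t', hst⟩ : ∃ m t',
        PySem.List.sorted (a :: t) (fun x => x) false = m :: t' := by
      cases hcase : PySem.List.sorted (a :: t) (fun x => x) false with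
      | nil => exact absurd hcase hsne
      | cons x y => exact ⟨x, y, rfl⟩
    have hperm : (m :: t').Perm (a :: t) := hst ▸ PySem.List.sorted_perm ..
    have hpair : (m :: t').Pairwise (· ≤ ·) := by
      have := PySem.List.sorted_pairwise (xs := a :: t) (key := fun x => x)
      rw [hst] at this
      simpa using this
    have hhead := PySem.List.key_head_sorted_le (a :: t) (fun x => x) hst
    have hm_mem : m ∈ (a :: t) := hperm.mem_iff.mp (by simp)
    have hmin_mem : (t.foldl min a) ∈ (a :: t) := PySem.List.min?_mem hmin
    have h1 : m ≤ t.foldl min a := by simpa using hhead (t.foldl min a) hmin_mem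
    have h2 : t.foldl min a ≤ m := by
      simpa using PySem.List.min?_isMin hmin m hm_mem
    have hm_eq : m = t.foldl min a := le_antisymm h1 h2
    have hlb : ∀ x ∈ (m :: t'), m ≤ x := by
      intro x hx
      simpa using hhead x (hperm.mem_iff.mp hx)
    have hrun : (pvRunLen m (m :: t') : Int) = (m :: t').count m :=
      runLen_eq_count m (m :: t') hlb hpair
    have hlen : (m :: t').length = (a :: t).length := by
      rw [← hst]; exact PySem.List.length_sorted ..
    have hcnt : (m :: t').count m = (a :: t).count m := hperm.count_eq m
    have hglb : ∀ x ∈ (a :: t), t.foldl min a ≤ x := fun x hx => by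
      simpa using PySem.List.min?_isMin hmin x hx
    rw [hst]
    have hlen' : t'.length + 1 = (a :: t).length := by simpa using hlen
    by_cases h1c : (((a :: t).length : Int) = 1)
    · have ht : t = [] := by
        cases t with
        | nil => rfl
        | cons b u => exfalso; simp at h1c; omega
      subst ht
      have ht' : t' = [] := by
        have := hperm.length_eq
        simpa using this
      subst ht'
      simp only [if_pos h1c]
      simp [pvRunLen]
    · simp only [if_neg h1c]
      have hA := countGT_loop (a :: t) (t.foldl min a) 0 hglb
      have hc2 : List.count (t.foldl min a) (a :: t) = List.count m (a :: t) := by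
        rw [hm_eq]
      rw [hA]
      simp only [List.length_cons] at hlen' ⊢
      omega
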